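-- pv_equiv track=rewrite | github.com/AlirezaSadeghi/Juck | lib/utils.py | create_pagination_range
-- ===== SOURCE A (Python) =====
-- def create_pagination_range(current, max_num):
--     limit = 4
--     counter = 0
--     i = current - 1
--     rng = []
--
--     while i > 0:
--         counter += 1
--         if counter > 2:
--             break
--         rng.append(i)
--         i -= 1
--     limit -= counter if counter == 0 else counter - 1
--     rng.reverse()
--
--     rng.append(current)
--
--     i = current + 1
--     counter = 0
--     while i <= max_num:
--         counter += 1
--         if counter > limit:
--             break
--         rng.append(i)
--         i += 1
--
--     return rng
-- ===== SOURCE B (Python) =====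
-- def create_pagination_range(current, max_num):
--     before = min(2, max(0, current - 1))
--     limit = max(2, min(4, 6 - current))
--     after = max(0, min(limit, max_num - current))
--     return list(range(current - before, current + after + 1))
-- ===== Notes on version B (the rewrite author's own statement) =====
-- stated objective: simpler
-- what changed: Replaced the two while-loops (walk back up to 2 pages, adjust the forward limit from the back-counter, walk forward up to limit pages) by a closed-form computation of the window bounds and a single range() construction.
import Mathlib
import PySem

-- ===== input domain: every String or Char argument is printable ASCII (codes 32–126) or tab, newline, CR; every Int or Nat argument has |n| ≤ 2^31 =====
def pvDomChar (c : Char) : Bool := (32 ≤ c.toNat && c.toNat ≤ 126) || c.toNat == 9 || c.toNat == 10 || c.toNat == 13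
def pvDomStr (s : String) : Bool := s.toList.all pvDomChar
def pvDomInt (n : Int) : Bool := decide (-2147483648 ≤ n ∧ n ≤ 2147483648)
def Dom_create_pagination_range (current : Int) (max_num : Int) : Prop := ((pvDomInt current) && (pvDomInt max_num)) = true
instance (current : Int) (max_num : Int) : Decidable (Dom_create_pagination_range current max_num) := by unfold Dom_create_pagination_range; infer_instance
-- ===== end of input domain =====

-- B replaces A's two while-loops by a closed-form computation of the window bounds
-- and one range construction (objective: simpler).

-- ===== PORT A =====
-- first while-loop: while i > 0: counter += 1; if counter > 2: break; rng.append(i); i -= 1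
def pagLoop1 (i counter : Int) (rng : List Int) : Int × List Int :=
  if i > 0 then
    if counter + 1 > 2 then (counter + 1, rng)
    else pagLoop1 (i - 1) (counter + 1) (rng ++ [i])
  else (counter, rng)
termination_by (3 - counter).toNat
decreasing_by omega

-- second while-loop: while i <= max_num: counter += 1; if counter > limit: break; rng.append(i); i += 1
def pagLoop2 (i counter limit max_num : Int) (rng : List Int) : List Int :=
  if i ≤ max_num then
    if counter + 1 > limit then rng
    else pagLoop2 (i + 1) (counter + 1) limit max_num (rng ++ [i])
  else rng
termination_by (limit + 1 - counter).toNat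
decreasing_by omega

def create_pagination_range (current : Int) (max_num : Int) : List Int :=
  let r1 := pagLoop1 (current - 1) 0 []
  let counter := r1.1
  let limit := 4 - (if counter = 0 then counter else counter - 1)
  let rng := r1.2.reverse ++ [current]
  pagLoop2 (current + 1) 0 limit max_num rng

-- ===== PORT B =====
def create_pagination_range_alt (current : Int) (max_num : Int) : List Int :=
  let before := min 2 (max 0 (current - 1))
  let limit := max 2 (min 4 (6 - current))
  let after := max 0 (min limit (max_num - current))
  PySem.List.pyRange (current - before) (current + after + 1) 1

-- ===== PRECONDITION & SPEC =====
def Spec_create_pagination_range (current : Int) (max_num : Int) (out : List Int) : Prop := out = create_pagination_range_alt current max_num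
instance (current : Int) (max_num : Int) (out : List Int) : Decidable (Spec_create_pagination_range current max_num out) := by unfold Spec_create_pagination_range; infer_instance

-- ===== CLAIM (what is proved, stated in full; the proofs are below) =====
def Claim_equal_create_pagination_range : Prop := ∀ (current : Int) (max_num : Int), Dom_create_pagination_range current max_num → Spec_create_pagination_range current max_num (create_pagination_range current max_num)

-- ===== LEMMAS AND PROOFS =====

lemma pagLoop1_case1 (current : Int) (h : current ≤ 1) :
    pagLoop1 (current - 1) 0 [] = (0, []) := by
  rw [pagLoop1, if_neg (by omega)]

lemma pagLoop1_case2 : pagLoop1 (1 : Int) 0 [] = (1, [1]) := by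
  rw [pagLoop1, if_pos (by omega), if_neg (by omega), pagLoop1, if_neg (by omega)]
  norm_num

lemma pagLoop1_case3 : pagLoop1 (2 : Int) 0 [] = (2, [2, 1]) := by
  rw [pagLoop1, if_pos (by omega), if_neg (by omega),
      pagLoop1, if_pos (by omega), if_neg (by omega),
      pagLoop1, if_neg (by omega)]
  norm_num

lemma pagLoop1_case4 (current : Int) (h : 4 ≤ current) :
    pagLoop1 (current - 1) 0 [] = (3, [current - 1, current - 2]) := by
  rw [pagLoop1, if_pos (by omega), if_neg (by omega),
      pagLoop1, if_pos (by omega), if_neg (by omega),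
      pagLoop1, if_pos (by omega), if_pos (by omega)]
  norm_num
  omega

lemma pagLoop2_spec (i counter limit max_num : Int) (rng : List Int) :
    pagLoop2 i counter limit max_num rng
      = rng ++ PySem.List.pyRange i (min (i + (limit - counter)) (max_num + 1)) 1 := by
  fun_induction pagLoop2 i counter limit max_num rng with
  | case1 =>
    rw [PySem.List.pyRange_one_eq_nil (by omega)]; simp
  | case2 =>
    rename_i i c rng h1 h2 ih
    have hb : i + 1 + (limit - (c + 1)) = i + (limit - c) := by ring
    rw [ih, hb, PySem.List.pyRange_one_cons (a := i) (by omega)]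
    simp
  | case3 =>
    rw [PySem.List.pyRange_one_eq_nil (by omega)]; simp

-- absorb a cons onto the front of a contiguous range
lemma cons_pyRange (c c' e : Int) (hc : c' = c + 1) :
    c :: PySem.List.pyRange c' e 1 = PySem.List.pyRange c (max e c') 1 := by
  subst hc
  by_cases h : c + 1 ≤ e
  · rw [max_eq_left h]
    exact (PySem.List.pyRange_one_cons (by omega : c < e)).symm
  · rw [PySem.List.pyRange_one_eq_nil (by omega), max_eq_right (by omega),
      PySem.List.pyRange_one_singleton]

-- ===== VERDICT (by name: the statement is the Claim_ definition above) =====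
theorem create_pagination_range_spec : Claim_equal_create_pagination_range := by
  intro current max_num _
  unfold Spec_create_pagination_range create_pagination_range create_pagination_range_alt
  rcases show current ≤ 1 ∨ current = 2 ∨ current = 3 ∨ 4 ≤ current by omega with h | h | h | h
  · rw [pagLoop1_case1 current h]
    simp only [pagLoop2_spec, List.reverse_nil, List.nil_append]
    norm_num
    rw [cons_pyRange current (current + 1) _ rfl]
    congr 1 <;> omega
  · subst h
    rw [show (2 : Int) - 1 = 1 by norm_num, pagLoop1_case2]
    simp only [pagLoop2_spec]
    norm_num
    rw [cons_pyRange 2 3 _ (by norm_num), cons_pyRange 1 2 _ (by norm_num)]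
    congr 1 <;> omega
  · subst h
    rw [show (3 : Int) - 1 = 2 by norm_num, pagLoop1_case3]
    simp only [pagLoop2_spec]
    norm_num
    rw [cons_pyRange 3 4 _ (by norm_num), cons_pyRange 2 3 _ (by norm_num),
        cons_pyRange 1 2 _ (by norm_num)]
    congr 1 <;> omega
  · rw [pagLoop1_case4 current h]
    simp only [pagLoop2_spec]
    norm_num
    rw [cons_pyRange current (current + 1) _ rfl,
        cons_pyRange (current - 1) current _ (by ring),
        cons_pyRange (current - 2) (current - 1) _ (by ring)]
    congr 1 <;> omega
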